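-- pv_equiv track=rewrite | github.com/brycewestheimer/autofragment-public | src/autofragment/multilevel/assignment.py | assign_by_residue
-- ===== SOURCE A (Python) =====
-- from typing import Any, Callable, Dict, List, Optional, Set, Tuple
--
-- def assign_by_residue(
--     residue_ids: List[str],
--     qm_residues: List[str],
-- ) -> Tuple[Set[int], Set[int]]:
--     """Assign atoms to QM or MM region based on residue name.
--
--     Args:
--         residue_ids: List of residue identifiers for each atom.
--             Can include residue name and number, e.g., ["ALA1", "GLY2", "WAT1"].
--         qm_residues: Residue identifiers that should be in QM region.
--
--     Returns:
--         Tuple of (qm_atoms, mm_atoms) as sets of atom indices.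
--
--     Example:
--         >>> residues = ["ALA", "ALA", "GLY", "WAT", "WAT"]
--         >>> qm, mm = assign_by_residue(residues, ["ALA", "GLY"])
--         >>> qm  # {0, 1, 2}
--         >>> mm  # {3, 4}
--     """
--     qm_residue_set = set(qm_residues)
--     qm_atoms: Set[int] = set()
--     mm_atoms: Set[int] = set()
--
--     for i, residue in enumerate(residue_ids):
--         if residue in qm_residue_set:
--             qm_atoms.add(i)
--         else:
--             mm_atoms.add(i)
--
--     return qm_atoms, mm_atoms
-- ===== SOURCE B (Python) =====
-- from typing import List, Set, Tuple
--
-- def assign_by_residue(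
--     residue_ids: List[str],
--     qm_residues: List[str],
-- ) -> Tuple[Set[int], Set[int]]:
--     """Divide-and-conquer: split the index range in half, partition each half
--     recursively, and merge the two partitions by set union."""
--     qm_set = set(qm_residues)
--
--     def solve(lo: int, hi: int) -> Tuple[Set[int], Set[int]]:
--         if hi - lo == 1:
--             if residue_ids[lo] in qm_set:
--                 return {lo}, set()
--             return set(), {lo}
--         mid = lo + (hi - lo) // 2
--         q1, m1 = solve(lo, mid)
--         q2, m2 = solve(mid, hi)
--         return q1 | q2, m1 | m2
--
--     if not residue_ids:
--         return set(), set()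
--     return solve(0, len(residue_ids))
-- ===== Notes on version B (the rewrite author's own statement) =====
-- stated objective: alternative
-- what changed: A's single linear pass with a two-way branch per index is replaced by a divide-and-conquer recursion: the index range is split in half, each half is partitioned recursively, and the two partitions are merged with set unions.
import Mathlib
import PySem

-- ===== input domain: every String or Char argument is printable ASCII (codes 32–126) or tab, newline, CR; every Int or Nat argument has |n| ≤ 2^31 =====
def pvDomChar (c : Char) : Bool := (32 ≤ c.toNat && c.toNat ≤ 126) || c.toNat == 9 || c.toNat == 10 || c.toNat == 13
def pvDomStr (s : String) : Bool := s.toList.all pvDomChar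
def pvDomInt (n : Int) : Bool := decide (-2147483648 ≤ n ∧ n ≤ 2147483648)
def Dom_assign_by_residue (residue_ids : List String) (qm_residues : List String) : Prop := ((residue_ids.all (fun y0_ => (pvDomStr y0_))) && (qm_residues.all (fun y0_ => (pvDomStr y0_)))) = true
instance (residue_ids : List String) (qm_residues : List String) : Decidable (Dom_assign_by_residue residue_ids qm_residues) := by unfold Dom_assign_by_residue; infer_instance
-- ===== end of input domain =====

-- B replaces A's single linear two-way-branch pass by a divide-and-conquer recursion
-- (split the index range in half, partition each half, merge with set unions); objective: alternative.

-- ===== PORT A =====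
def assign_by_residue (residue_ids : List String) (qm_residues : List String) : List Int × List Int :=
  let qm_residue_set : PySem.Set String := PySem.Set.ofList qm_residues
  (PySem.List.enumerate residue_ids).foldl
    (fun (st : PySem.Set Int × PySem.Set Int) p =>
      if PySem.Set.contains qm_residue_set p.2 then (PySem.Set.add st.1 p.1, st.2)
      else (st.1, PySem.Set.add st.2 p.1))
    (PySem.Set.empty, PySem.Set.empty)

-- ===== PORT B =====
-- inner 'solve(lo, hi)' of Source B; recursion on the width of the index range
def pvSolveB (ids : List String) (qset : PySem.Set String) (lo hi : Int) : PySem.Set Int × PySem.Set Int :=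
  if hi - lo = 1 then
    match PySem.List.pyGet? ids lo with
    | some r => if PySem.Set.contains qset r then ([lo], ([] : List Int)) else ([], [lo])
    | none => ([], [])  -- unreachable from the entry (lo stays in range; Python would raise IndexError)
  else if hi - lo ≤ 0 then ([], [])  -- totality guard; the entry never reaches hi ≤ lo (Python would recurse forever)
  else
    let mid := lo + PySem.Int.floordiv (hi - lo) 2
    let p1 := pvSolveB ids qset lo mid
    let p2 := pvSolveB ids qset mid hi
    (PySem.Set.union p1.1 p2.1, PySem.Set.union p1.2 p2.2)
termination_by (hi - lo).toNat
decreasing_by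
  · rw [PySem.Int.floordiv_eq_ediv_of_pos (by norm_num)]; omega
  · rw [PySem.Int.floordiv_eq_ediv_of_pos (by norm_num)]; omega

def assign_by_residue_alt (residue_ids : List String) (qm_residues : List String) : List Int × List Int :=
  let qm_set : PySem.Set String := PySem.Set.ofList qm_residues
  if residue_ids.isEmpty then ([], [])
  else pvSolveB residue_ids qm_set 0 residue_ids.length

-- ===== PRECONDITION & SPEC =====
def Spec_assign_by_residue (residue_ids : List String) (qm_residues : List String) (out : List Int × List Int) : Prop := out = assign_by_residue_alt residue_ids qm_residues
instance (residue_ids : List String) (qm_residues : List String) (out : List Int × List Int) : Decidable (Spec_assign_by_residue residue_ids qm_residues out) := by unfold Spec_assign_by_residue; infer_instance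

-- ===== CLAIM (what is proved, stated in full; the proofs are below) =====
def Claim_equal_assign_by_residue : Prop := ∀ (residue_ids : List String) (qm_residues : List String), Dom_assign_by_residue residue_ids qm_residues → Spec_assign_by_residue residue_ids qm_residues (assign_by_residue residue_ids qm_residues)

-- ===== LEMMAS AND PROOFS =====

-- indices of the atoms of xs (enumerated from s) whose residue satisfies c
def pvPartL (c : String → Bool) (s : Int) (xs : List String) : List Int :=
  ((PySem.List.enumerate xs s).filter (fun p => c p.2)).map (·.1)

-- the same index set, expressed as a filter of the index range [lo, hi)
def pvIdx (ids : List String) (c : String → Bool) (lo hi : Int) : List Int :=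
  (PySem.List.pyRange lo hi 1).filter (fun i =>
    match PySem.List.pyGet? ids i with | some r => c r | none => false)

theorem pvPartL_cons (c : String → Bool) (s : Int) (x : String) (xs : List String) :
    pvPartL c s (x :: xs) = (if c x then [s] else []) ++ pvPartL c (s+1) xs := by
  simp only [pvPartL, PySem.List.enumerate_cons, List.filter_cons]
  by_cases hx : c x <;> simp [hx]

-- the A-side fold accumulates exactly the two index lists
theorem pvFoldA (c : String → Bool) :
    ∀ (xs : List String) (s : Int) (q m : List Int),
      (∀ i ∈ q, i < s) → (∀ i ∈ m, i < s) →
      (PySem.List.enumerate xs s).foldl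
        (fun (st : PySem.Set Int × PySem.Set Int) p =>
          if c p.2 then (PySem.Set.add st.1 p.1, st.2)
          else (st.1, PySem.Set.add st.2 p.1)) (q, m)
        = (q ++ pvPartL c s xs, m ++ pvPartL (fun r => !c r) s xs) := by
  intro xs
  induction xs with
  | nil => intro s q m _ _; simp [pvPartL, PySem.List.enumerate]
  | cons x xs ih =>
    intro s q m hq hm
    rw [PySem.List.enumerate_cons, List.foldl_cons]
    by_cases hx : c x = true
    · have hfresh : (s : Int) ∉ q := fun hs => absurd (hq s hs) (lt_irrefl s)
      rw [if_pos hx, PySem.Set.add_of_not_mem hfresh]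
      rw [ih (s+1) (q ++ [s]) m ?_ ?_]
      · rw [pvPartL_cons, pvPartL_cons, if_pos hx, if_neg (by simp [hx])]
        simp
      · intro i hi
        rcases List.mem_append.mp hi with h1 | h1
        · exact lt_trans (hq i h1) (by omega)
        · simp at h1; omega
      · intro i hi; exact lt_trans (hm i hi) (by omega)
    · have hfresh : (s : Int) ∉ m := fun hs => absurd (hm s hs) (lt_irrefl s)
      rw [if_neg hx, PySem.Set.add_of_not_mem hfresh]
      rw [ih (s+1) q (m ++ [s]) ?_ ?_]
      · rw [pvPartL_cons, pvPartL_cons, if_neg hx, if_pos (by simp [hx])]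
        simp
      · intro i hi; exact lt_trans (hq i hi) (by omega)
      · intro i hi
        rcases List.mem_append.mp hi with h1 | h1
        · exact lt_trans (hm i h1) (by omega)
        · simp at h1; omega

-- pvPartL over a suffix of ids equals the range-filter form over the full list
theorem pvPartL_eq_pvIdx (ids : List String) (c : String → Bool) :
    ∀ (xs : List String) (s : Int), 0 ≤ s → ids.drop s.toNat = xs →
      s + xs.length = ids.length → pvPartL c s xs = pvIdx ids c s ids.length := by
  intro xs
  induction xs with
  | nil =>
    intro s _ _ hlen
    have hs : s = (ids.length : Int) := by simpa using hlen
    subst hs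
    simp [pvPartL, pvIdx, PySem.List.enumerate, PySem.List.pyRange_one_eq_nil le_rfl]
  | cons x xs ih =>
    intro s hs hdrop hlen
    have hslt : s < (ids.length : Int) := by simp at hlen ⊢; omega
    have hget : PySem.List.pyGet? ids s = some x := by
      have h0 : ids[s.toNat]? = some x := by
        have h := congrArg (fun l : List String => l[0]?) hdrop
        simpa using h
      rw [PySem.List.pyGet?_of_nonneg ids hs]
      exact h0
    rw [pvPartL_cons]
    unfold pvIdx
    rw [PySem.List.pyRange_one_cons hslt, List.filter_cons]
    have hdrop' : ids.drop (s+1).toNat = xs := by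
      have : (s+1).toNat = s.toNat + 1 := by omega
      rw [this, ← List.drop_drop, hdrop]
      simp
    have htail := ih (s+1) (by omega) hdrop' (by simp at hlen ⊢; omega)
    rw [pvPartL] at htail
    simp only [hget]
    by_cases hx : c x <;>
      simp [hx, htail, pvPartL, pvIdx]

theorem pvIdx_nodup (ids : List String) (c : String → Bool) (lo hi : Int) :
    (pvIdx ids c lo hi).Nodup :=
  (PySem.List.nodup_pyRange_one lo hi).filter _

theorem pvIdx_mem (ids : List String) (c : String → Bool) (lo hi : Int) :
    ∀ i ∈ pvIdx ids c lo hi, lo ≤ i ∧ i < hi := by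
  intro i hi'
  have := (List.mem_filter.mp hi').1
  exact PySem.List.mem_pyRange_one.mp this

theorem pvIdx_split (ids : List String) (c : String → Bool) (lo mid hi : Int)
    (h1 : lo ≤ mid) (h2 : mid ≤ hi) :
    pvIdx ids c lo hi = pvIdx ids c lo mid ++ pvIdx ids c mid hi := by
  unfold pvIdx
  rw [PySem.List.pyRange_one_append lo mid hi h1 h2, List.filter_append]

-- union of the two halves' index sets is concatenation (disjoint, ordered halves)
theorem pvUnion_split (ids : List String) (c : String → Bool) (lo mid hi : Int)
    (h1 : lo ≤ mid) (h2 : mid ≤ hi) :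
    PySem.Set.union (pvIdx ids c lo mid) (pvIdx ids c mid hi) = pvIdx ids c lo hi := by
  rw [pvIdx_split ids c lo mid hi h1 h2]
  have hdisj : ∀ x ∈ pvIdx ids c mid hi, x ∉ pvIdx ids c lo mid := by
    intro x hx hx'
    have b1 := pvIdx_mem ids c mid hi x hx
    have b2 := pvIdx_mem ids c lo mid x hx'
    omega
  show PySem.Set.update _ _ = _
  rw [PySem.Set.update_eq_append_of_disjoint _ _ (pvIdx_nodup ids c mid hi) hdisj]

-- the divide-and-conquer solver computes the two range-filter index sets
theorem pvSolveB_eq (ids : List String) (qset : PySem.Set String) :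
    ∀ (n : Nat) (lo hi : Int), (hi - lo).toNat = n → 0 ≤ lo → 1 ≤ hi - lo →
      hi ≤ ids.length →
      pvSolveB ids qset lo hi =
        (pvIdx ids (fun r => PySem.Set.contains qset r) lo hi,
         pvIdx ids (fun r => !PySem.Set.contains qset r) lo hi) := by
  intro n
  induction n using Nat.strong_induction_on with
  | _ n ih =>
    intro lo hi hn hlo hwidth hhi
    rw [pvSolveB]
    by_cases h1 : hi - lo = 1
    · rw [if_pos h1]
      have hhi' : hi = lo + 1 := by omega
      have hget : PySem.List.pyGet? ids lo = some (ids.get ⟨lo.toNat, by omega⟩) := by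
        rw [PySem.List.pyGet?_of_nonneg ids hlo]
        simp [List.getElem?_eq_getElem (by omega : lo.toNat < ids.length)]
      rw [hget]
      subst hhi'
      unfold pvIdx
      rw [PySem.List.pyRange_one_singleton]
      simp only [List.filter_cons, List.filter_nil]
      rw [hget]
      by_cases hc : ids[lo.toNat] ∈ qset <;> simp [hc]
    · rw [if_neg h1, if_neg (by omega)]
      have hfd : PySem.Int.floordiv (hi - lo) 2 = (hi - lo) / 2 :=
        PySem.Int.floordiv_eq_ediv_of_pos (by norm_num)
      set mid := lo + PySem.Int.floordiv (hi - lo) 2 with hmid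
      have hm1 : lo + 1 ≤ mid := by rw [hmid, hfd]; omega
      have hm2 : mid + 1 ≤ hi := by rw [hmid, hfd]; omega
      show (PySem.Set.union (pvSolveB ids qset lo mid).1 (pvSolveB ids qset mid hi).1,
            PySem.Set.union (pvSolveB ids qset lo mid).2 (pvSolveB ids qset mid hi).2) = _
      rw [ih (mid - lo).toNat (by omega) lo mid rfl hlo (by omega) (by omega),
          ih (hi - mid).toNat (by omega) mid hi rfl (by omega) (by omega) hhi]
      simp only
      rw [pvUnion_split ids _ lo mid hi (by omega) (by omega)]
      rw [pvUnion_split ids _ lo mid hi (by omega) (by omega)]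

-- ===== VERDICT (by name: the statement is the Claim_ definition above) =====
theorem assign_by_residue_spec : Claim_equal_assign_by_residue := by
  intro residue_ids qm_residues _
  unfold Spec_assign_by_residue assign_by_residue assign_by_residue_alt
  set qset : PySem.Set String := PySem.Set.ofList qm_residues with hq
  have hA := pvFoldA (fun r => PySem.Set.contains qset r) residue_ids 0 [] []
    (by simp) (by simp)
  simp only [PySem.Set.empty] at hA ⊢
  rw [hA]
  cases residue_ids with
  | nil => simp [pvPartL, PySem.List.enumerate]
  | cons x xs =>
    rw [if_neg (by simp)]
    rw [pvSolveB_eq (x :: xs) qset ((x :: xs).length : Nat) 0 ((x :: xs).length : Int)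
      (by simp) le_rfl (by simp) le_rfl]
    rw [pvPartL_eq_pvIdx (x :: xs) _ (x :: xs) 0 le_rfl (by simp) (by simp)]
    rw [pvPartL_eq_pvIdx (x :: xs) _ (x :: xs) 0 le_rfl (by simp) (by simp)]
    simp
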